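-- pv_equiv track=rewrite | github.com/uujinn/Algorithm-Study | BOJ/Tree/20924-트리의_기둥과_가지-NY.py | DFS
-- ===== SOURCE A (Python) =====
-- def DFS(visited, nodes, idx, weight):
--     max_w = 0
--     for child in nodes[idx]:
--         if visited[child[0]]:
--             visited[idx] = True
--             continue
--         w = DFS(visited, nodes, child[0], child[1])
--         max_w = max(w, max_w)
--     visited[idx] = True
--     return max_w + weight
-- ===== SOURCE B (Python) =====
-- def DFS(visited, nodes, idx, weight):
--     # iterative: explicit frame stack (node, entry-weight, remaining children, running max)
--     stack = [(idx, weight, list(nodes[idx]), 0)]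
--     while True:
--         u, w, rest, maxw = stack.pop()
--         if rest:
--             (v, cw), rest2 = rest[0], rest[1:]
--             if visited[v]:
--                 visited[u] = True
--                 stack.append((u, w, rest2, maxw))
--             else:
--                 stack.append((u, w, rest2, maxw))
--                 stack.append((v, cw, list(nodes[v]), 0))
--         else:
--             visited[u] = True
--             r = maxw + w
--             if not stack:
--                 return r
--             p, pw, prest, pmax = stack.pop()
--             stack.append((p, pw, prest, max(r, pmax)))
-- ===== Notes on version B (the rewrite author's own statement) =====
-- stated objective: alternative
-- what changed: Replaces A's call recursion by an iterative loop over an explicit stack of frames (node, weight, remaining children, running max) with the post-order result folded into the parent frame; same visited-marking order and same in-place mutation of visited, so the return value (and final visited list) coincide, and the Lean ports are proved equal on all of Dom, not just on Pre_.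
import Mathlib
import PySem

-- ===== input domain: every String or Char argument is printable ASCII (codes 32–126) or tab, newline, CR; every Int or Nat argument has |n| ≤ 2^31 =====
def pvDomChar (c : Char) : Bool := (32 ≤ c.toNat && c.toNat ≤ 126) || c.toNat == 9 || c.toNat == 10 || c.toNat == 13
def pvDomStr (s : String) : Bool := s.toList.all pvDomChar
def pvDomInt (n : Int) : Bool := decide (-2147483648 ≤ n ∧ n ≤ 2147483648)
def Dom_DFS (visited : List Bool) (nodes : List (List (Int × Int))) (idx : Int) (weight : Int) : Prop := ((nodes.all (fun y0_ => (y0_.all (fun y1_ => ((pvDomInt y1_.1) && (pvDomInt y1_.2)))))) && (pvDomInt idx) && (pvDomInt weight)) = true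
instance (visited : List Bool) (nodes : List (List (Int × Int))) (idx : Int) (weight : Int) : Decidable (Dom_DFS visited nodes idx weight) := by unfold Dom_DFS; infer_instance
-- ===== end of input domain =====

-- B replaces A's call recursion by an iterative loop over an explicit frame stack, mutating
-- `visited` in place exactly as A does; the proved return-value equality holds on ALL of Dom
-- (both ports use the same depth-fuel discipline, so they agree even where Python A raises),
-- and Pre_DFS only delimits the inputs on which Python A returns normally.

-- ===== PORT A =====
-- literal port of A; the Python recursion can diverge (cycles) and raise IndexError, so the
-- port threads the mutated `visited` list, returns `none` for IndexError, and the recursion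
-- depth is guarded by a fuel counter (`bigFuel`, far beyond any depth Python A survives).
mutual
  def dfsA (nodes : List (List (Int × Int))) : Nat → List Bool → Int → Int → Option (Int × List Bool)
    | 0, _, _, _ => none
    | fuel+1, vis, idx, weight =>
      match PySem.List.pyGet? nodes idx with
      | none => none
      | some row =>
        match dfsAgo nodes fuel row vis idx 0 with
        | none => none
        | some (vis1, maxw) =>
          match PySem.List.pySet? vis1 idx true with
          | none => none
          | some vis2 => some (maxw + weight, vis2)
  termination_by fuel _ _ _ => (fuel, 0)
  -- the `for child in nodes[idx]` loop: state (visited, max_w), threaded left to right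
  def dfsAgo (nodes : List (List (Int × Int))) : Nat → List (Int × Int) → List Bool → Int → Int → Option (List Bool × Int)
    | _, [], vis, _, maxw => some (vis, maxw)
    | fuel, (c, cw) :: rest, vis, idx, maxw =>
      match PySem.List.pyGet? vis c with
      | none => none
      | some true =>
        match PySem.List.pySet? vis idx true with
        | none => none
        | some vis' => dfsAgo nodes fuel rest vis' idx maxw
      | some false =>
        match dfsA nodes fuel vis c cw with
        | none => none
        | some (r, vis') => dfsAgo nodes fuel rest vis' idx (max r maxw)
  termination_by fuel row _ _ _ => (fuel, row.length + 1)
end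

def bigT (nodes : List (List (Int × Int))) : Nat := nodes.foldr (fun r a => r.length + a) 0 + 2
def bigFuel (nodes : List (List (Int × Int))) : Nat := bigT nodes ^ bigT nodes

def DFS (visited : List Bool) (nodes : List (List (Int × Int))) (idx : Int) (weight : Int) : Int :=
  match dfsA nodes (bigFuel nodes) visited idx weight with
  | some (r, _) => r
  | none => 0

-- ===== PORT B =====
-- Source B: iterative DFS over an explicit stack of frames (node, weight, remaining children,
-- running max).  The Lean frame carries one extra `Nat`, the depth fuel a call at this frame
-- hands to its children — added only to make the loop total (Source B needs none); `none` stands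
-- for IndexError / fuel exhaustion.
def maxRowB (nodes : List (List (Int × Int))) : Nat := nodes.foldr (fun r a => Nat.max r.length a) 0
-- weight of one pending child at fuel f, for the termination measure of the loop
def wfB (m : Nat) : Nat → Nat
  | 0 => 1
  | f+1 => m * wfB m f + 2
def frameM (m : Nat) : Int × Int × List (Int × Int) × Int × Nat → Nat
  | (_, _, rest, _, f) => rest.length * wfB m f + 1
def stackM (m : Nat) (stk : List (Int × Int × List (Int × Int) × Int × Nat)) : Nat :=
  (stk.map (frameM m)).sum

theorem wfB_pos (m : Nat) : ∀ f, 1 ≤ wfB m f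
  | 0 => le_refl 1
  | f+1 => by unfold wfB; omega

theorem rowLen_le_maxRowB (nodes : List (List (Int × Int))) (v : Int) (row : List (Int × Int))
    (h : PySem.List.pyGet? nodes v = some row) : row.length ≤ maxRowB nodes := by
  have hm : row ∈ nodes := PySem.List.mem_of_pyGet?_eq_some _ h
  clear h
  induction nodes with
  | nil => simp at hm
  | cons x xs ih =>
    rcases List.mem_cons.1 hm with h1 | h2
    · subst h1; simp [maxRowB]
    · have := ih h2
      simp [maxRowB] at this ⊢
      omega

def loopB (nodes : List (List (Int × Int))) : List Bool → List (Int × Int × List (Int × Int) × Int × Nat) → Option (Int × List Bool)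
  | _, [] => none
  | vis, (u, w, (v, cw) :: rest2, maxw, f) :: stk =>
    match PySem.List.pyGet? vis v with
    | none => none
    | some true =>
      match PySem.List.pySet? vis u true with
      | none => none
      | some vis' => loopB nodes vis' ((u, w, rest2, maxw, f) :: stk)
    | some false =>
      match f with
      | 0 => none
      | f'+1 =>
        match hrow : PySem.List.pyGet? nodes v with
        | none => none
        | some vrow => loopB nodes vis ((v, cw, vrow, 0, f') :: (u, w, rest2, maxw, f'+1) :: stk)
  | vis, (u, w, [], maxw, f) :: stk =>
    match PySem.List.pySet? vis u true with
    | none => none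
    | some vis' =>
      match stk with
      | [] => some (maxw + w, vis')
      | (p, pw, prest, pmax, pf) :: stk2 => loopB nodes vis' ((p, pw, prest, max (maxw + w) pmax, pf) :: stk2)
termination_by _ stk => stackM (maxRowB nodes) stk
decreasing_by
  · simp [stackM, frameM, Nat.add_mul]
    have := wfB_pos (maxRowB nodes) f
    omega
  · have hle := rowLen_le_maxRowB nodes v vrow hrow
    simp [stackM, frameM, wfB, Nat.add_mul]
    have h1 := wfB_pos (maxRowB nodes) f'
    have h2 : vrow.length * wfB (maxRowB nodes) f' ≤ maxRowB nodes * wfB (maxRowB nodes) f' :=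
      Nat.mul_le_mul_right _ hle
    omega
  · simp [stackM, frameM]

def DFS_alt (visited : List Bool) (nodes : List (List (Int × Int))) (idx : Int) (weight : Int) : Int :=
  match bigFuel nodes with
  | 0 => 0
  | f+1 =>
    match PySem.List.pyGet? nodes idx with
    | none => 0
    | some row =>
      match loopB nodes visited [(idx, weight, row, 0, f)] with
      | some (r, _) => r
      | none => 0

-- ===== PRECONDITION & SPEC =====
-- Pre_DFS delimits the inputs on which Python A returns normally: it excludes IndexError
-- (an out-of-range index reached by the traversal) and unbounded recursion (a cycle through
-- initially-unvisited nodes not cut by an initially-visited earlier sibling).  The cycle test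
-- uses only the initial `visited` flags, so it is conservative: on rare cyclic inputs that
-- only run-time marking cuts, A still returns — and B returns the same value there (the
-- equality theorem below holds on all of Dom and does not depend on Pre_DFS).
def totEnt (nodes : List (List (Int × Int))) : Nat := nodes.foldr (fun r a => r.length + a) 0
def rowOf (nodes : List (List (Int × Int))) (u : Int) : List (Int × Int) :=
  (PySem.List.pyGet? nodes u).getD []
-- children reachable along an edge whose target is unvisited in the INITIAL visited list
def g0succ (visited : List Bool) (nodes : List (List (Int × Int))) (u : Int) : List Int :=
  (rowOf nodes u).filterMap (fun cw =>
    if PySem.List.pyGet? visited cw.1 = some false then some cw.1 else none)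
def expandG0 (visited : List Bool) (nodes : List (List (Int × Int))) (l : List Int) : List Int :=
  (l ++ l.flatMap (g0succ visited nodes)).dedup
def reachG0 (visited : List Bool) (nodes : List (List (Int × Int))) (idx : Int) : List Int :=
  (expandG0 visited nodes)^[totEnt nodes + 1] [idx]
-- children before the first initially-visited sibling (an initially-visited earlier sibling
-- marks u before this edge is examined, so a cycle closing back into u is cut)
def hChildren (visited : List Bool) (nodes : List (List (Int × Int))) (u : Int) : List Int :=
  ((rowOf nodes u).takeWhile (fun cw =>
      match PySem.List.pyGet? visited cw.1 with
      | some true => false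
      | _ => true)).filterMap (fun cw =>
    if PySem.List.pyGet? visited cw.1 = some false then some cw.1 else none)
def expandH (visited : List Bool) (nodes : List (List (Int × Int))) (l : List Int) : List Int :=
  (l ++ l.flatMap (hChildren visited nodes)).dedup
def hReach (visited : List Bool) (nodes : List (List (Int × Int))) (l : List Int) : List Int :=
  (expandH visited nodes)^[totEnt nodes + 1] l
-- no IndexError can arise at node u: its row exists and all indices touched are in range
def goodNode (visited : List Bool) (nodes : List (List (Int × Int))) (u : Int) : Prop :=
  (PySem.List.pyGet? nodes u).isSome ∧ PySem.Raise.InRange visited.length u ∧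
  ∀ cw ∈ rowOf nodes u, PySem.Raise.InRange visited.length cw.1

def Pre_DFS (visited : List Bool) (nodes : List (List (Int × Int))) (idx : Int) (weight : Int) : Prop :=
  ∀ u ∈ reachG0 visited nodes idx,
    goodNode visited nodes u ∧ u ∉ hReach visited nodes (hChildren visited nodes u)
instance (visited : List Bool) (nodes : List (List (Int × Int))) (idx : Int) (weight : Int) : Decidable (Pre_DFS visited nodes idx weight) := by
  unfold Pre_DFS goodNode PySem.Raise.InRange; infer_instance

def pvWitness_DFS : List Bool × (List (List (Int × Int))) × Int × Int := ([true, false], [[(1, 3)], []], 0, 2)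

def Spec_DFS (visited : List Bool) (nodes : List (List (Int × Int))) (idx : Int) (weight : Int) (out : Int) : Prop := out = DFS_alt visited nodes idx weight
instance (visited : List Bool) (nodes : List (List (Int × Int))) (idx : Int) (weight : Int) (out : Int) : Decidable (Spec_DFS visited nodes idx weight out) := by unfold Spec_DFS; infer_instance

-- ===== CLAIM (what is proved, stated in full; the proofs are below) =====
def Claim_equal_DFS : Prop := ∀ (visited : List Bool) (nodes : List (List (Int × Int))) (idx : Int) (weight : Int), Dom_DFS visited nodes idx weight → Pre_DFS visited nodes idx weight → Spec_DFS visited nodes idx weight (DFS visited nodes idx weight)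

-- ===== LEMMAS AND PROOFS =====

-- the machine's action when a simulated call returns r with visited state vis2
def retStep (nodes : List (List (Int × Int))) (r : Int) (vis2 : List Bool) :
    List (Int × Int × List (Int × Int) × Int × Nat) → Option (Int × List Bool)
  | [] => some (r, vis2)
  | (p, pw, prest, pmax, pf) :: stk2 => loopB nodes vis2 ((p, pw, prest, max r pmax, pf) :: stk2)

-- exact bisimulation: the stack machine run of one frame equals the recursion's loop, fuel
-- for fuel (both return `none` together: same IndexError point, same depth exhaustion)
theorem go_eq (nodes : List (List (Int × Int))) : ∀ (f : Nat) (rest : List (Int × Int)) (vis : List Bool)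
    (u w maxw : Int) (stk : List (Int × Int × List (Int × Int) × Int × Nat)),
    loopB nodes vis ((u, w, rest, maxw, f) :: stk)
      = match dfsAgo nodes f rest vis u maxw with
        | none => none
        | some (vis1, m1) =>
          match PySem.List.pySet? vis1 u true with
          | none => none
          | some vis2 => retStep nodes (m1 + w) vis2 stk := by
  intro f
  induction f with
  | zero =>
    intro rest
    induction rest with
    | nil =>
      intro vis u w maxw stk
      rw [loopB, dfsAgo]
      cases h : PySem.List.pySet? vis u true
      · simp only [h]
      · cases stk <;> simp only [h, retStep]
    | cons c rest ih =>
      intro vis u w maxw stk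
      obtain ⟨cv, cw⟩ := c
      rw [loopB, dfsAgo]
      cases hv : PySem.List.pyGet? vis cv with
      | none => simp only [hv]
      | some b =>
        cases b with
        | false => simp only [hv, show dfsA nodes 0 vis cv cw = none from by rw [dfsA]]
        | true =>
          simp only [hv]
          cases hs : PySem.List.pySet? vis u true with
          | none => simp only [hs]
          | some vis' => simp only [hs]; exact ih vis' u w maxw stk
  | succ f ihf =>
    intro rest
    induction rest with
    | nil =>
      intro vis u w maxw stk
      rw [loopB, dfsAgo]
      cases h : PySem.List.pySet? vis u true
      · simp only [h]
      · cases stk <;> simp only [h, retStep]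
    | cons c rest ih =>
      intro vis u w maxw stk
      obtain ⟨cv, cw⟩ := c
      rw [loopB, dfsAgo]
      cases hv : PySem.List.pyGet? vis cv with
      | none => simp only [hv]
      | some b =>
        cases b with
        | true =>
          simp only [hv]
          cases hs : PySem.List.pySet? vis u true with
          | none => simp only [hs]
          | some vis' => simp only [hs]; exact ih vis' u w maxw stk
        | false =>
          -- unvisited child: push a frame; by ihf the child run equals the child call,
          -- and retStep feeds its result back into this frame
          simp only [hv]
          rw [dfsA]
          cases hrow : PySem.List.pyGet? nodes cv with
          | none => simp only [hrow]
          | some vrow =>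
            simp only [hrow]
            rw [ihf vrow vis cv cw 0 ((u, w, rest, maxw, f+1) :: stk)]
            cases hgo : dfsAgo nodes f vrow vis cv 0 with
            | none => simp only [hgo]
            | some p =>
              obtain ⟨vis1, m1⟩ := p
              simp only [hgo]
              cases hs : PySem.List.pySet? vis1 cv true with
              | none => simp only [hs]
              | some vis2 =>
                simp only [hs, retStep]
                exact ih vis2 u w (max (m1 + cw) maxw) stk

theorem bigFuel_pos (nodes : List (List (Int × Int))) : 1 ≤ bigFuel nodes := by
  have : 1 ≤ bigT nodes := by unfold bigT; omega
  exact Nat.one_le_pow _ _ (by omega)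

-- the ports agree on EVERY input (Pre_DFS is not needed for the equality)
theorem DFS_eq_alt (visited : List Bool) (nodes : List (List (Int × Int))) (idx : Int) (weight : Int) :
    DFS visited nodes idx weight = DFS_alt visited nodes idx weight := by
  obtain ⟨f, hf⟩ : ∃ f, bigFuel nodes = f + 1 :=
    ⟨bigFuel nodes - 1, by have := bigFuel_pos nodes; omega⟩
  unfold DFS DFS_alt
  rw [hf, dfsA]
  cases hrow : PySem.List.pyGet? nodes idx with
  | none => simp only [hrow]
  | some row =>
    simp only [hrow]
    rw [go_eq nodes f row visited idx weight 0 []]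
    cases hgo : dfsAgo nodes f row visited idx 0 with
    | none => simp only [hgo]
    | some p =>
      obtain ⟨vis1, m1⟩ := p
      simp only [hgo]
      cases hs : PySem.List.pySet? vis1 idx true with
      | none => simp only [hs]
      | some vis2 => simp only [hs, retStep]

-- ===== VERDICT (by name: the statement is the Claim_ definition above) =====
theorem DFS_spec : Claim_equal_DFS := by
  intro visited nodes idx weight _ _
  exact DFS_eq_alt visited nodes idx weight
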